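-- pv_equiv track=rewrite | github.com/NathanKe/AdventPython | 2023/14_answer.py | shuffle_arr
-- ===== SOURCE A (Python) =====
-- from collections import deque
--
-- def shuffle_left(i_str):
--     queue = deque(i_str)
--     out = []
--     dots = []
--     ohs = []
--     while queue:
--         cur = queue.popleft()
--         if cur == '#':
--             out += ohs
--             out += dots
--             ohs = []
--             dots = []
--             out.append(cur)
--         elif cur == 'O':
--             ohs.append(cur)
--         else:
--             dots.append(cur)
--     out += ohs
--     out += dots
--     res = ''.join(out)
--     assert len(i_str) == len(res)
--     return res
--
-- def shuffle_right(i_str):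
--     queue = deque(i_str)
--     out = deque()
--     dots = []
--     ohs = []
--     while queue:
--         cur = queue.pop()
--         if cur == '#':
--             [out.appendleft(o) for o in ohs]
--             [out.appendleft(d) for d in dots]
--             ohs = []
--             dots = []
--             out.appendleft(cur)
--         elif cur == 'O':
--             ohs.append(cur)
--         else:
--             dots.append(cur)
--     [out.appendleft(o) for o in ohs]
--     [out.appendleft(d) for d in dots]
--     res = ''.join(out)
--     assert len(i_str) == len(res)
--     return res
--
-- def shuffle_arr(i_arr, direction):
--     o_arr = []
--     for row in i_arr:
--         if direction == "LEFT":
--             o_arr.append(shuffle_left(row))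
--         else:
--             o_arr.append(shuffle_right(row))
--     return o_arr
-- ===== SOURCE B (Python) =====
-- def shuffle_arr(i_arr, direction):
--     o_arr = []
--     for row in i_arr:
--         segs = []
--         for seg in row.split('#'):
--             ohs = [c for c in seg if c == 'O']
--             rest = [c for c in seg if c != 'O']
--             segs.append(''.join(ohs + rest) if direction == "LEFT" else ''.join(rest + ohs))
--         o_arr.append('#'.join(segs))
--     return o_arr
-- ===== Notes on version B (the rewrite author's own statement) =====
-- stated objective: simpler
-- what changed: Replaces A's per-row streaming deque loops with flush-on-'#' accumulators (and a reversed right-to-left scan for the non-LEFT direction) by split each row on '#', partition each segment into its 'O's and the remaining characters, and rejoin with '#'.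
import Mathlib
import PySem

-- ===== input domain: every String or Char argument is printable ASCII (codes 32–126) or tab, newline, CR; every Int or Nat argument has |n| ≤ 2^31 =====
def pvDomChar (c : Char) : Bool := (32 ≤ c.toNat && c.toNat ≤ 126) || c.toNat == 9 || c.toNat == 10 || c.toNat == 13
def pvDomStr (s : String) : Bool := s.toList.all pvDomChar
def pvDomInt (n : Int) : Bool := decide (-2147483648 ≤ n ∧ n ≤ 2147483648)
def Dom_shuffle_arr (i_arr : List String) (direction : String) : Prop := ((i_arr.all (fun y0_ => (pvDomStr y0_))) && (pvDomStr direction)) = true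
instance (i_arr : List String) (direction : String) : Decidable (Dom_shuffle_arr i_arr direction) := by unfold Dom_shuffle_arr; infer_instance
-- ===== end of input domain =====

-- B replaces A's per-row streaming deque loops (and the reversed scan for RIGHT) by split-on-'#',
-- partition each segment's 'O's from the rest, and rejoin — simpler, same results.

-- ===== PORT A =====
-- shuffle_left's while loop over the deque, with out/dots/ohs accumulators
-- (the assert always holds — every consumed char is emitted exactly once — and is omitted).
def slGo : List Char → List Char → List Char → List Char → List Char
  | [], out, dots, ohs => out ++ ohs ++ dots
  | cur :: queue, out, dots, ohs =>
    if cur = '#' then slGo queue (out ++ ohs ++ dots ++ [cur]) [] []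
    else if cur = 'O' then slGo queue out dots (ohs ++ [cur])
    else slGo queue out (dots ++ [cur]) ohs

def shuffle_left (s : String) : String := String.mk (slGo s.toList [] [] [])

-- shuffle_right: queue.pop() consumes from the right end, so the loop runs over the reversed
-- characters; appendleft of each o in ohs, then each d in dots, then cur prepends
-- cur :: dots.reverse ++ ohs.reverse to the output deque.
def srGo : List Char → List Char → List Char → List Char → List Char
  | [], out, dots, ohs => dots.reverse ++ ohs.reverse ++ out
  | cur :: queue, out, dots, ohs =>
    if cur = '#' then srGo queue (cur :: (dots.reverse ++ ohs.reverse ++ out)) [] []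
    else if cur = 'O' then srGo queue out dots (ohs ++ [cur])
    else srGo queue out (dots ++ [cur]) ohs

def shuffle_right (s : String) : String := String.mk (srGo s.toList.reverse [] [] [])

def shuffle_arr (i_arr : List String) (direction : String) : List String :=
  i_arr.foldl
    (fun o_arr row =>
      o_arr ++ [if direction == "LEFT" then shuffle_left row else shuffle_right row]) []

-- ===== PORT B =====
-- row.split('#') is List.splitOn '#' on the characters; '#'.join is List.intercalate ['#'].
def shuffle_arr_alt (i_arr : List String) (direction : String) : List String :=
  i_arr.map (fun row =>
    String.mk (List.intercalate ['#']
      ((List.splitOn '#' row.toList).map (fun seg =>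
        let ohs := seg.filter (fun c => c == 'O')
        let rest := seg.filter (fun c => c != 'O')
        if direction == "LEFT" then ohs ++ rest else rest ++ ohs))))

-- ===== PRECONDITION & SPEC =====
def Spec_shuffle_arr (i_arr : List String) (direction : String) (out : List String) : Prop := out = shuffle_arr_alt i_arr direction
instance (i_arr : List String) (direction : String) (out : List String) : Decidable (Spec_shuffle_arr i_arr direction out) := by unfold Spec_shuffle_arr; infer_instance

-- ===== CLAIM (what is proved, stated in full; the proofs are below) =====
def Claim_equal_shuffle_arr : Prop := ∀ (i_arr : List String) (direction : String), Dom_shuffle_arr i_arr direction → Spec_shuffle_arr i_arr direction (shuffle_arr i_arr direction)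

-- ===== LEMMAS AND PROOFS =====

def transL (seg : List Char) : List Char :=
  seg.filter (fun c => c == 'O') ++ seg.filter (fun c => c != 'O')

def transR (seg : List Char) : List Char :=
  seg.filter (fun c => c != 'O') ++ seg.filter (fun c => c == 'O')

-- first segment before the first '#', and the remaining segments
def sp : List Char → List Char × List (List Char)
  | [] => ([], [])
  | c :: rest => if c = '#' then ([], (sp rest).1 :: (sp rest).2) else (c :: (sp rest).1, (sp rest).2)

lemma sp_eq (cs : List Char) : List.splitOn '#' cs = (sp cs).1 :: (sp cs).2 := by
  induction cs with
  | nil => simp [List.splitOn, List.splitOnP_nil, sp]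
  | cons c rest ih =>
    unfold List.splitOn at *
    rw [List.splitOnP_cons]
    by_cases h : c = '#'
    · simp [h, sp, ih]
    · have hb : (c == '#') = false := by simp [h]
      simp [hb, sp, h, ih]

def joinL : List (List Char) → List Char
  | [] => []
  | [s] => transL s
  | s :: s' :: ss => transL s ++ '#' :: joinL (s' :: ss)

def joinR : List (List Char) → List Char
  | [] => []
  | [s] => transR s
  | s :: s' :: ss => transR s ++ '#' :: joinR (s' :: ss)

lemma intercalate_cons_cons (x y : List Char) (zs : List (List Char)) :
    List.intercalate ['#'] (x :: y :: zs) = x ++ '#' :: List.intercalate ['#'] (y :: zs) := by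
  simp [List.intercalate, List.intersperse]

lemma intercalate_map_transL (l : List (List Char)) :
    List.intercalate ['#'] (l.map transL) = joinL l := by
  induction l with
  | nil => simp [joinL, List.intercalate]
  | cons s ss ih =>
    cases ss with
    | nil => simp [joinL, List.intercalate]
    | cons s' ss' =>
      simp only [List.map_cons] at *
      rw [intercalate_cons_cons, ih]
      simp [joinL]

lemma intercalate_map_transR (l : List (List Char)) :
    List.intercalate ['#'] (l.map transR) = joinR l := by
  induction l with
  | nil => simp [joinR, List.intercalate]
  | cons s ss ih =>
    cases ss with
    | nil => simp [joinR, List.intercalate]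
    | cons s' ss' =>
      simp only [List.map_cons] at *
      rw [intercalate_cons_cons, ih]
      simp [joinR]

def tailL : List (List Char) → List Char
  | [] => []
  | s :: ss => '#' :: joinL (s :: ss)

lemma joinL_cons (h : List Char) (t : List (List Char)) :
    joinL (h :: t) = transL h ++ tailL t := by
  cases t <;> simp [joinL, tailL]

lemma tailL_cons (s : List Char) (ss : List (List Char)) :
    tailL (s :: ss) = '#' :: (transL s ++ tailL ss) := by
  cases ss <;> simp [tailL, joinL]

lemma slGo_eq (cs : List Char) : ∀ out dots ohs : List Char,
    slGo cs out dots ohs =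
      out ++ (ohs ++ (sp cs).1.filter (fun c => c == 'O')) ++
        (dots ++ (sp cs).1.filter (fun c => c != 'O')) ++ tailL (sp cs).2 := by
  induction cs with
  | nil => intro out dots ohs; simp [slGo, sp, tailL]
  | cons c rest ih =>
    intro out dots ohs
    by_cases h : c = '#'
    · subst h
      have e1 : slGo ('#' :: rest) out dots ohs = slGo rest (out ++ ohs ++ dots ++ ['#']) [] [] := by
        simp [slGo]
      have e2 : sp ('#' :: rest) = ([], (sp rest).1 :: (sp rest).2) := by simp [sp]
      rw [e1, ih, e2, tailL_cons]
      simp [transL, List.append_assoc]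
    · by_cases hO : c = 'O'
      · subst hO
        have e1 : slGo ('O' :: rest) out dots ohs = slGo rest out dots (ohs ++ ['O']) := by
          simp [slGo]
        have e2 : sp ('O' :: rest) = ('O' :: (sp rest).1, (sp rest).2) := by simp [sp]
        rw [e1, ih, e2]
        simp [List.filter_cons, List.append_assoc]
      · have e1 : slGo (c :: rest) out dots ohs = slGo rest out (dots ++ [c]) ohs := by
          simp [slGo, h, hO]
        have e2 : sp (c :: rest) = (c :: (sp rest).1, (sp rest).2) := by simp [sp, h]
        rw [e1, ih, e2]
        have h1 : ((fun c => c == 'O') c) = false := by simp [hO]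
        have h2 : ((fun c => c != 'O') c) = true := by simp [hO]
        simp [List.filter_cons, h1, h2, List.append_assoc]

lemma left_eq (cs : List Char) :
    slGo cs [] [] [] = List.intercalate ['#'] ((List.splitOn '#' cs).map transL) := by
  rw [sp_eq, intercalate_map_transL, joinL_cons, slGo_eq]
  simp [transL]

def tailR : List (List Char) → List Char
  | [] => []
  | s :: ss =>
      tailR ss ++ (s.filter (fun c => c != 'O')).reverse ++
        (s.filter (fun c => c == 'O')).reverse ++ ['#']

lemma tailR_append (a b : List (List Char)) : tailR (a ++ b) = tailR b ++ tailR a := by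
  induction a with
  | nil => simp [tailR]
  | cons s ss ih => simp [tailR, ih]

lemma srGo_eq (rs : List Char) : ∀ out dots ohs : List Char,
    srGo rs out dots ohs =
      tailR (sp rs).2 ++ ((sp rs).1.filter (fun c => c != 'O')).reverse ++ dots.reverse ++
        ((sp rs).1.filter (fun c => c == 'O')).reverse ++ ohs.reverse ++ out := by
  induction rs with
  | nil => intro out dots ohs; simp [srGo, sp, tailR]
  | cons c rest ih =>
    intro out dots ohs
    by_cases h : c = '#'
    · subst h
      have e1 : srGo ('#' :: rest) out dots ohs =
          srGo rest ('#' :: (dots.reverse ++ ohs.reverse ++ out)) [] [] := by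
        simp [srGo]
      have e2 : sp ('#' :: rest) = ([], (sp rest).1 :: (sp rest).2) := by simp [sp]
      rw [e1, ih, e2]
      simp [tailR, List.append_assoc]
    · by_cases hO : c = 'O'
      · subst hO
        have e1 : srGo ('O' :: rest) out dots ohs = srGo rest out dots (ohs ++ ['O']) := by
          simp [srGo]
        have e2 : sp ('O' :: rest) = ('O' :: (sp rest).1, (sp rest).2) := by simp [sp]
        rw [e1, ih, e2]
        simp [List.filter_cons, List.append_assoc]
      · have e1 : srGo (c :: rest) out dots ohs = srGo rest out (dots ++ [c]) ohs := by
          simp [srGo, h, hO]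
        have e2 : sp (c :: rest) = (c :: (sp rest).1, (sp rest).2) := by simp [sp, h]
        rw [e1, ih, e2]
        have h1 : ((fun c => c == 'O') c) = false := by simp [hO]
        have h2 : ((fun c => c != 'O') c) = true := by simp [hO]
        simp [List.filter_cons, h1, h2, List.append_assoc]

-- append one char at the end of the last block
def modLast : List (List Char) → Char → List (List Char)
  | [], _ => []
  | [s], c => [s ++ [c]]
  | s :: s' :: ss, c => s :: modLast (s' :: ss) c

lemma modLast_append (X : List (List Char)) (y : List Char) (c : Char) :
    modLast (X ++ [y]) c = X ++ [y ++ [c]] := by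
  induction X with
  | nil => simp [modLast]
  | cons s ss ih =>
    cases hs : ss ++ [y] with
    | nil => simp at hs
    | cons u us =>
      simp only [List.cons_append, hs, modLast]
      rw [← hs, ih]

lemma sp_snoc_hash (xs : List Char) :
    sp (xs ++ ['#']) = ((sp xs).1, (sp xs).2 ++ [[]]) := by
  induction xs with
  | nil => simp [sp]
  | cons c xs ih =>
    by_cases h : c = '#' <;> simp [sp, h, ih]

lemma sp_snoc_ne (xs : List Char) (c : Char) (hc : c ≠ '#') :
    sp (xs ++ [c]) =
      (if (sp xs).2 = [] then ((sp xs).1 ++ [c], ([] : List (List Char)))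
       else ((sp xs).1, modLast (sp xs).2 c)) := by
  induction xs with
  | nil => simp [sp, hc]
  | cons a xs ih =>
    by_cases h : a = '#'
    · subst h
      simp only [List.cons_append, sp, if_pos rfl]
      by_cases h2 : (sp xs).2 = []
      · simp [h2] at ih
        simp [ih, h2, modLast]
      · simp [h2] at ih
        simp [ih, h2]
        cases ht : (sp xs).2 with
        | nil => exact absurd ht h2
        | cons u us => simp [modLast, ← ht]
    · simp only [List.cons_append, sp, if_neg h]
      by_cases h2 : (sp xs).2 = []
      · simp [h2] at ih
        simp [ih, h2]
      · simp [h2] at ih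
        simp [ih, h2]

lemma cons_modLast (a : List Char) (t : List (List Char)) (X : List (List Char))
    (y : List Char) (c : Char) (hEq : a :: t = X ++ [y]) (ht : t ≠ []) :
    a :: modLast t c = X ++ [y ++ [c]] := by
  cases X with
  | nil =>
    simp only [List.nil_append, List.cons.injEq] at hEq
    exact absurd hEq.2 ht
  | cons x X' =>
    simp only [List.cons_append, List.cons.injEq] at hEq ⊢
    exact ⟨hEq.1, by rw [hEq.2, modLast_append]⟩

lemma spRev (cs : List Char) :
    (sp cs.reverse).1 :: (sp cs.reverse).2 =
      (((sp cs).1 :: (sp cs).2).map List.reverse).reverse := by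
  induction cs with
  | nil => simp [sp]
  | cons c cs' ih =>
    have hrev : (c :: cs').reverse = cs'.reverse ++ [c] := by simp
    by_cases h : c = '#'
    · subst h
      have hsp : sp ('#' :: cs') = ([], (sp cs').1 :: (sp cs').2) := by simp [sp]
      rw [hrev, sp_snoc_hash, hsp]
      have : (sp cs'.reverse).1 :: ((sp cs'.reverse).2 ++ [[]]) =
          ((sp cs'.reverse).1 :: (sp cs'.reverse).2) ++ [[]] := rfl
      rw [this, ih]
      simp
    · have hsp : sp (c :: cs') = (c :: (sp cs').1, (sp cs').2) := by simp [sp, h]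
      rw [hrev, sp_snoc_ne _ _ h, hsp]
      by_cases h2 : (sp cs'.reverse).2 = []
      · rw [if_pos h2]
        rw [h2] at ih
        cases ht : (sp cs').2 with
        | nil =>
          rw [ht] at ih
          simp only [List.map_cons, List.map_nil, List.reverse_cons, List.reverse_nil,
            List.nil_append, List.cons.injEq, and_true] at ih
          simp [ih]
        | cons u us =>
          rw [ht] at ih
          have hlen := congrArg List.length ih
          simp at hlen
      · rw [if_neg h2]
        have hx : (sp cs'.reverse).1 :: (sp cs'.reverse).2 =
            ((List.map List.reverse (sp cs').2).reverse) ++ [(sp cs').1.reverse] := by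
          rw [ih]; simp
        rw [cons_modLast _ _ _ _ c hx h2]
        simp

lemma mirror (l : List (List Char)) : ∀ (h1 : List Char) (t1 : List (List Char)),
    h1 :: t1 = (l.map List.reverse).reverse →
    tailR t1 ++ (h1.filter (fun c => c != 'O')).reverse ++
      (h1.filter (fun c => c == 'O')).reverse = joinR l := by
  induction l with
  | nil => intro h1 t1 hEq; simp at hEq
  | cons s rest ih =>
    intro h1 t1 hEq
    cases rest with
    | nil =>
      simp only [List.map_cons, List.map_nil, List.reverse_cons, List.reverse_nil,
        List.nil_append, List.cons.injEq] at hEq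
      rw [hEq.1, hEq.2]
      simp [tailR, joinR, transR, List.filter_reverse]
    | cons s' rest' =>
      cases hx : (List.map List.reverse (s' :: rest')).reverse with
      | nil => simp at hx
      | cons x X =>
        have hIH := ih x X hx.symm
        have hx' := hx
        simp only [List.map_cons, List.reverse_cons] at hx'
        have hEq2 : h1 :: t1 = x :: (X ++ [s.reverse]) := by
          rw [hEq]
          simp only [List.map_cons, List.reverse_cons]
          rw [hx']
          simp
        simp only [List.cons.injEq] at hEq2
        rw [hEq2.1, hEq2.2, tailR_append]
        rw [show joinR (s :: s' :: rest') = transR s ++ '#' :: joinR (s' :: rest') from by simp [joinR]]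
        rw [← hIH]
        simp [tailR, transR, List.filter_reverse, List.append_assoc]

lemma right_eq (cs : List Char) :
    srGo cs.reverse [] [] [] = List.intercalate ['#'] ((List.splitOn '#' cs).map transR) := by
  rw [sp_eq, intercalate_map_transR, srGo_eq]
  simp only [List.reverse_nil, List.append_nil, List.nil_append]
  exact mirror ((sp cs).1 :: (sp cs).2) _ _ (spRev cs)

-- reduce A's foldl-append loop to a map
lemma shuffle_arr_eq_map (i_arr : List String) (direction : String) :
    shuffle_arr i_arr direction =
      i_arr.map (fun row => if direction == "LEFT" then shuffle_left row else shuffle_right row) := by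
  unfold shuffle_arr
  rw [PySem.List.foldl_append_singleton_eq_map]
  simp

lemma row_eq (row : String) (direction : String) :
    (if direction == "LEFT" then shuffle_left row else shuffle_right row) =
      String.mk (List.intercalate ['#']
        ((List.splitOn '#' row.toList).map (fun seg =>
          let ohs := seg.filter (fun c => c == 'O')
          let rest := seg.filter (fun c => c != 'O')
          if direction == "LEFT" then ohs ++ rest else rest ++ ohs))) := by
  by_cases h : direction == "LEFT"
  · simp only [h, if_pos]
    unfold shuffle_left
    rw [left_eq]
    refine congrArg _ (congrArg _ ?_)
    apply List.map_congr_left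
    intro seg _
    simp [transL, h]
  · have hb : (direction == "LEFT") = false := by simpa using h
    simp only [hb, Bool.false_eq_true, if_false]
    unfold shuffle_right
    rw [right_eq]
    refine congrArg _ (congrArg _ ?_)
    apply List.map_congr_left
    intro seg _
    simp [transR, hb]

-- ===== VERDICT (by name: the statement is the Claim_ definition above) =====
theorem shuffle_arr_spec : Claim_equal_shuffle_arr := by
  intro i_arr direction _
  unfold Spec_shuffle_arr shuffle_arr_alt
  rw [shuffle_arr_eq_map]
  apply List.map_congr_left
  intro row _
  exact row_eq row direction
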